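-- pv_equiv track=rewrite | github.com/arunkhattri/HackerRank | Algorithm/queens_attack.py | max_diag_left_up
-- ===== SOURCE A (Python) =====
-- def max_diag_left_up(row, col, dim):
--     move_count = 0
--     up_lim = dim + 1
--     low_lim = 0
--     # diagonal left up moves
--     dlu_i, dlu_j = row + 1, col - 1
--     while dlu_i < up_lim and dlu_j > low_lim:
--         move_count += 1
--         dlu_i += 1
--         dlu_j -= 1
--     return move_count
-- ===== SOURCE B (Python) =====
-- def max_diag_left_up(row, col, dim):
--     # closed form: steps until hitting top edge (dim - row) or left edge (col - 1)
--     return max(0, min(dim - row, col - 1))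
-- ===== Notes on version B (the rewrite author's own statement) =====
-- stated objective: faster
-- what changed: replaced the step-by-step while loop with the closed form max(0, min(dim - row, col - 1))
import Mathlib
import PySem

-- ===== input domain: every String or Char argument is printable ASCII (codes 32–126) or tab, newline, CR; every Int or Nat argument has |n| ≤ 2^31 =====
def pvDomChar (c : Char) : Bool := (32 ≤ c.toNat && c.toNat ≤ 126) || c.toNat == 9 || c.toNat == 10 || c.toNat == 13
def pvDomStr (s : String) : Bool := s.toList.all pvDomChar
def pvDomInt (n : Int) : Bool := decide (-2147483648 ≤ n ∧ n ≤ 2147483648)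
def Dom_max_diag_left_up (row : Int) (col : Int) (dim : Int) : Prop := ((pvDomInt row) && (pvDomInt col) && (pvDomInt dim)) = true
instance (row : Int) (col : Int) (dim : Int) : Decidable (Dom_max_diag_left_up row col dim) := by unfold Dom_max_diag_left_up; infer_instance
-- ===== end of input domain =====

-- ===== PORT A =====
-- while loop of A: counts steps while dlu_i < up_lim and dlu_j > 0; terminates since dlu_j decreases
def pvLoopA (up_lim dlu_i dlu_j move_count : Int) : Int :=
  if dlu_i < up_lim ∧ 0 < dlu_j then
    pvLoopA up_lim (dlu_i + 1) (dlu_j - 1) (move_count + 1)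
  else
    move_count
termination_by dlu_j.toNat
decreasing_by omega

def max_diag_left_up (row : Int) (col : Int) (dim : Int) : Int :=
  pvLoopA (dim + 1) (row + 1) (col - 1) 0

-- ===== PORT B =====
-- B: closed form, max(0, min(dim - row, col - 1))
def max_diag_left_up_alt (row : Int) (col : Int) (dim : Int) : Int :=
  max 0 (min (dim - row) (col - 1))

-- ===== PRECONDITION & SPEC =====
def Spec_max_diag_left_up (row : Int) (col : Int) (dim : Int) (out : Int) : Prop := out = max_diag_left_up_alt row col dim
instance (row : Int) (col : Int) (dim : Int) (out : Int) : Decidable (Spec_max_diag_left_up row col dim out) := by unfold Spec_max_diag_left_up; infer_instance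

-- ===== CLAIM (what is proved, stated in full; the proofs are below) =====
def Claim_equal_max_diag_left_up : Prop := ∀ (row : Int) (col : Int) (dim : Int), Dom_max_diag_left_up row col dim → Spec_max_diag_left_up row col dim (max_diag_left_up row col dim)

-- ===== LEMMAS AND PROOFS =====

-- ===== VERDICT (by name: the statement is the Claim_ definition above) =====
theorem pvLoopA_closed (u i j a : Int) : pvLoopA u i j a = a + max 0 (min (u - i) j) := by
  by_cases h : i < u ∧ 0 < j
  · rw [pvLoopA, if_pos h, pvLoopA_closed]
    omega
  · rw [pvLoopA, if_neg h]
    omega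
termination_by j.toNat
decreasing_by omega

theorem max_diag_left_up_spec : Claim_equal_max_diag_left_up := by
  intro row col dim _
  unfold Spec_max_diag_left_up max_diag_left_up max_diag_left_up_alt
  rw [pvLoopA_closed]
  omega
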